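-- pv_equiv track=rewrite | github.com/Trovemaster/TROVE | test/compare_results.py | find_log_block
-- ===== SOURCE A (Python) =====
-- def find_log_block(lines, blockname):
--     """Identify start and end of block in log file"""
--     start_idx = end_idx = None
--     for i, line in enumerate(lines):
--         if blockname in line:
--             start_idx = i
--             break
--
--     if start_idx is None:
--         raise Exception(f"{blockname} not found")
--
--      # find first "done" after we've found blockname
--     for i, line in enumerate(lines[start_idx:]):
--         if "done" in line:
--             end_idx = i + start_idx
--             break
--
--     if end_idx is None:
--         raise Exception(f"Could not find end of {blockname}")
--
--     return start_idx, end_idx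
-- ===== SOURCE B (Python) =====
-- def find_log_block(lines, blockname):
--     """Identify start and end of block in log file (single pass)."""
--     start_idx = None
--     for i, line in enumerate(lines):
--         if start_idx is None and blockname in line:
--             start_idx = i
--         if start_idx is not None and "done" in line:
--             return start_idx, i
--     if start_idx is None:
--         raise Exception(f"{blockname} not found")
--     raise Exception(f"Could not find end of {blockname}")
-- ===== Notes on version B (the rewrite author's own statement) =====
-- stated objective: simpler
-- what changed: Replaced A's two scans (find blockname, then re-scan a slice of the list for 'done') by one loop over enumerate(lines) that carries a start_idx state and returns as soon as a 'done' line at or after the start is seen; no slice is built.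
import Mathlib
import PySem

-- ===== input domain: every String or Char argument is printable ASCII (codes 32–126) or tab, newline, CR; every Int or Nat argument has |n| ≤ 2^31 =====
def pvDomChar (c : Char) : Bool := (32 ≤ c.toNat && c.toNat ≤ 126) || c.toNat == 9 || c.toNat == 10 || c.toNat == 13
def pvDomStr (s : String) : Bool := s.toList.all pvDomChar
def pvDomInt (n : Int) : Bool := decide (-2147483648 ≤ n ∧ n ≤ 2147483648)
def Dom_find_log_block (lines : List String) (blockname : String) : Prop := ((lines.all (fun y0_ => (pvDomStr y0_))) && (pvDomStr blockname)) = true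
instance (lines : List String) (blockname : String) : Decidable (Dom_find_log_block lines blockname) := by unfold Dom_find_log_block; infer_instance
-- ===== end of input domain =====

-- B replaces A's two scans (find blockname, then scan a slice for "done") by one
-- state-carrying loop over the enumerated lines; objective: simpler, same cost.


-- ===== PORT A =====
-- 'for i, line in enumerate(ls): if needle in line: return i (break)' — counter-threaded recursion
def aFindIdx (needle : String) : List String → Int → Option Int
  | [], _ => none
  | l :: ls, i => if PySem.Str.isIn needle l then some i else aFindIdx needle ls (i + 1)

def find_log_block (lines : List String) (blockname : String) : Int × Int :=
  match aFindIdx blockname lines 0 with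
  | none => (0, 0)          -- Python: raise Exception(f"{blockname} not found") — excluded by Pre_
  | some s =>
    -- for i, line in enumerate(lines[start_idx:]): if "done" in line: end_idx = i + start_idx
    match aFindIdx "done" (PySem.List.slice lines (some s) none) 0 with
    | none => (0, 0)        -- Python: raise Exception(f"Could not find end of {blockname}") — excluded by Pre_
    | some j => (s, j + s)

-- ===== PORT B =====
-- single loop over enumerate(lines), carrying start_idx : Option Int
def bLoop (blockname : String) : List String → Int → Option Int → Option (Int × Int)
  | [], _, _ => none
  | l :: ls, i, st =>
    let st' := if st.isNone && PySem.Str.isIn blockname l then some i else st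
    match st' with
    | some s => if PySem.Str.isIn "done" l then some (s, i) else bLoop blockname ls (i + 1) (some s)
    | none => bLoop blockname ls (i + 1) none

def find_log_block_alt (lines : List String) (blockname : String) : Int × Int :=
  (bLoop blockname lines 0 none).getD (0, 0)   -- none = Python raises; excluded by Pre_

-- ===== PRECONDITION & SPEC =====
-- Pre_ excludes exactly the inputs on which A raises: no line contains blockname, or no
-- line at or after the first blockname line contains "done".
def Pre_find_log_block (lines : List String) (blockname : String) : Prop :=
  ∃ i < lines.length, ∃ j < lines.length, i ≤ j ∧
    PySem.Str.isIn blockname (lines.getD i "") = true ∧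
    PySem.Str.isIn "done" (lines.getD j "") = true
instance (lines : List String) (blockname : String) : Decidable (Pre_find_log_block lines blockname) := by
  unfold Pre_find_log_block; infer_instance

def pvWitness_find_log_block : List String × String := (["block x", "all done"], "block")

def Spec_find_log_block (lines : List String) (blockname : String) (out : Int × Int) : Prop := out = find_log_block_alt lines blockname
instance (lines : List String) (blockname : String) (out : Int × Int) : Decidable (Spec_find_log_block lines blockname out) := by unfold Spec_find_log_block; infer_instance

-- ===== CLAIM (what is proved, stated in full; the proofs are below) =====
def Claim_equal_find_log_block : Prop := ∀ (lines : List String) (blockname : String), Dom_find_log_block lines blockname → Pre_find_log_block lines blockname → Spec_find_log_block lines blockname (find_log_block lines blockname)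

-- ===== LEMMAS AND PROOFS =====

-- the found index is at least the starting counter and within the list
theorem aFindIdx_bounds (needle : String) (ls : List String) (i s : Int)
    (h : aFindIdx needle ls i = some s) : i ≤ s ∧ s < i + ls.length := by
  induction ls generalizing i with
  | nil => simp [aFindIdx] at h
  | cons l ls ih =>
    simp only [aFindIdx] at h
    split at h
    · cases h
      simp only [List.length_cons]
      push_cast
      omega
    · have := ih (i + 1) h
      simp only [List.length_cons] at *
      push_cast at *
      omega

-- with the start already found, B's loop is A's "done" search paired with the start
theorem bLoop_some (blockname : String) (ls : List String) (i s : Int) :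
    bLoop blockname ls i (some s) = (aFindIdx "done" ls i).map (fun j => (s, j)) := by
  induction ls generalizing i with
  | nil => simp [bLoop, aFindIdx]
  | cons l ls ih =>
    have h1 : bLoop blockname (l :: ls) i (some s)
        = if PySem.Str.isIn "done" l then some (s, i) else bLoop blockname ls (i + 1) (some s) := rfl
    have h2 : aFindIdx "done" (l :: ls) i
        = if PySem.Str.isIn "done" l then some i else aFindIdx "done" ls (i + 1) := rfl
    rw [h1, h2]
    split_ifs with hd
    · rfl
    · rw [ih]

-- shifting the counter shifts the result
theorem aFindIdx_shift (needle : String) (ls : List String) (i a : Int) :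
    aFindIdx needle ls (i + a) = (aFindIdx needle ls i).map (· + a) := by
  induction ls generalizing i with
  | nil => simp [aFindIdx]
  | cons l ls ih =>
    simp only [aFindIdx]
    split
    · simp
    · have h : i + a + 1 = (i + 1) + a := by ring
      rw [h, ih]

-- B's loop with no start yet = A's two-phase computation, indices threaded
theorem bLoop_none (blockname : String) (ls : List String) (i : Int) :
    bLoop blockname ls i none =
      match aFindIdx blockname ls i with
      | none => none
      | some s => (aFindIdx "done" (ls.drop (s - i).toNat) 0).map (fun j => (s, j + s)) := by
  induction ls generalizing i with
  | nil => simp [bLoop, aFindIdx]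
  | cons l ls ih =>
    cases hb : PySem.Str.isIn blockname l with
    | true =>
      have h1 : bLoop blockname (l :: ls) i none
          = if PySem.Str.isIn "done" l then some (i, i) else bLoop blockname ls (i + 1) (some i) := by
        simp only [bLoop, Option.isNone_none, Bool.true_and, hb, if_true]
      have h2 : aFindIdx blockname (l :: ls) i = some i := by
        simp only [aFindIdx, hb, if_true]
      rw [h1, h2]
      dsimp only
      have hsub : (i - i).toNat = 0 := by omega
      rw [hsub, List.drop_zero]
      have h3 : aFindIdx "done" (l :: ls) 0
          = if PySem.Str.isIn "done" l then some 0 else aFindIdx "done" ls 1 := rfl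
      rw [h3]
      split_ifs with hd
      · simp
      · rw [bLoop_some]
        have h4 : i + 1 = 1 + i := by ring
        rw [h4, aFindIdx_shift]
        cases aFindIdx "done" ls 1 with
        | none => rfl
        | some j => rfl
    | false =>
      have h1 : bLoop blockname (l :: ls) i none = bLoop blockname ls (i + 1) none := by
        simp only [bLoop, Option.isNone_none, Bool.true_and, hb, Bool.false_eq_true, if_false]
      have h2 : aFindIdx blockname (l :: ls) i = aFindIdx blockname ls (i + 1) := by
        simp only [aFindIdx, hb, Bool.false_eq_true, if_false]
      rw [h1, h2, ih]
      cases hfound : aFindIdx blockname ls (i + 1) with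
      | none => rfl
      | some s =>
        have hle := (aFindIdx_bounds blockname ls (i + 1) s hfound).1
        have hdrop : (s - i).toNat = (s - (i + 1)).toNat + 1 := by omega
        dsimp only
        rw [hdrop, List.drop_succ_cons]

-- the two ports agree on every input (also where both signal "not found" via the default)
theorem ports_eq (lines : List String) (blockname : String) :
    find_log_block lines blockname = find_log_block_alt lines blockname := by
  unfold find_log_block find_log_block_alt
  rw [bLoop_none]
  cases hfound : aFindIdx blockname lines 0 with
  | none => rfl
  | some s =>
    have hb := aFindIdx_bounds blockname lines 0 s hfound
    dsimp only
    have hs : s = ((s.toNat : Nat) : Int) := by omega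
    rw [PySem.List.slice_some_none, hs, PySem.List.clampIdx_natCast]
    have hmin : min s.toNat lines.length = s.toNat := by omega
    rw [hmin]
    have hsub : (((s.toNat : Nat) : Int) - 0).toNat = s.toNat := by omega
    rw [hsub]
    cases aFindIdx "done" (lines.drop s.toNat) 0 with
    | none => rfl
    | some j => rfl

-- ===== VERDICT (by name: the statement is the Claim_ definition above) =====
theorem find_log_block_spec : Claim_equal_find_log_block := by
  intro lines blockname _ _
  unfold Spec_find_log_block
  exact ports_eq lines blockname
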